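-- pv_equiv track=rewrite | github.com/jswope2112/CX4230 | car_inflows.py | car_inflows
-- ===== SOURCE A (Python) =====
-- def car_inflows(num_cars, car_flow,  max_car_allowed, time_allowed):
--     time = 0
--     cars_added = 0
--
--     while num_cars > max_car_allowed:
--         if time > time_allowed:
--             return cars_added
--
--         num_cars += car_flow
--         cars_added += car_flow
--         time += 1
--
--     return cars_added
-- ===== SOURCE B (Python) =====
-- def car_inflows(num_cars, car_flow, max_car_allowed, time_allowed):
--     if num_cars <= max_car_allowed or time_allowed < 0:
--         return 0
--     cap = time_allowed + 1
--     if car_flow >= 0: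
--         return car_flow * cap
--     # ceiling division: iterations needed to bring num_cars down to max_car_allowed
--     need = -((max_car_allowed - num_cars) // (-car_flow))
--     return car_flow * min(need, cap)
-- ===== Notes on version B (the rewrite author's own statement) =====
-- stated objective: faster
-- what changed: Replaced A's step-by-step simulation loop (one iteration per time tick) with closed-form arithmetic: ceiling division computes the number of iterations needed, capped by time_allowed + 1.
import Mathlib
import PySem

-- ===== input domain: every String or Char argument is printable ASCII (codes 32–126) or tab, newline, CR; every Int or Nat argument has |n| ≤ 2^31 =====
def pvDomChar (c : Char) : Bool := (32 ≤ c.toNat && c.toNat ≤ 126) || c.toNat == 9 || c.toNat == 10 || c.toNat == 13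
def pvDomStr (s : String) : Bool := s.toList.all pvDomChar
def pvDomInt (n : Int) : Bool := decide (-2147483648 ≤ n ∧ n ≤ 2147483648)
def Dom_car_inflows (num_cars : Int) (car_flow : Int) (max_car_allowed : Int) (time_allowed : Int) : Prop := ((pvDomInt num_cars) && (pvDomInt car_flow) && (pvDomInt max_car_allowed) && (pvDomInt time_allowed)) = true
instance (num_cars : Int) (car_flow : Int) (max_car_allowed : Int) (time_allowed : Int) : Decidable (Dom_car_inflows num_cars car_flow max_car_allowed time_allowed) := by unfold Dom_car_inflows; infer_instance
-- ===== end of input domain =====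

-- B replaces A's step-by-step simulation loop with O(1) closed-form arithmetic (ceiling division for the needed iteration count, capped by the time limit).

-- ===== PORT A =====
-- the while-loop of A: state (num_cars, time, cars_added); terminates because time grows toward time_allowed
def pvLoopA (car_flow : Int) (max_car_allowed : Int) (time_allowed : Int)
    (num_cars : Int) (time : Int) (cars_added : Int) : Int :=
  if num_cars > max_car_allowed then
    if time > time_allowed then cars_added
    else pvLoopA car_flow max_car_allowed time_allowed
           (num_cars + car_flow) (time + 1) (cars_added + car_flow)
  else cars_added
termination_by (time_allowed + 1 - time).toNat
decreasing_by omega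

def car_inflows (num_cars : Int) (car_flow : Int) (max_car_allowed : Int) (time_allowed : Int) : Int :=
  pvLoopA car_flow max_car_allowed time_allowed num_cars 0 0

-- ===== PORT B =====
def car_inflows_alt (num_cars : Int) (car_flow : Int) (max_car_allowed : Int) (time_allowed : Int) : Int :=
  if num_cars ≤ max_car_allowed ∨ time_allowed < 0 then 0
  else
    let cap := time_allowed + 1
    if car_flow ≥ 0 then car_flow * cap
    else
      -- ceiling division: iterations needed to bring num_cars down to max_car_allowed
      let need := -(PySem.Int.floordiv (max_car_allowed - num_cars) (-car_flow))
      car_flow * min need cap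

-- ===== PRECONDITION & SPEC =====
def Spec_car_inflows (num_cars : Int) (car_flow : Int) (max_car_allowed : Int) (time_allowed : Int) (out : Int) : Prop := out = car_inflows_alt num_cars car_flow max_car_allowed time_allowed
instance (num_cars : Int) (car_flow : Int) (max_car_allowed : Int) (time_allowed : Int) (out : Int) : Decidable (Spec_car_inflows num_cars car_flow max_car_allowed time_allowed out) := by unfold Spec_car_inflows; infer_instance

-- ===== CLAIM (what is proved, stated in full; the proofs are below) =====
def Claim_equal_car_inflows : Prop := ∀ (num_cars : Int) (car_flow : Int) (max_car_allowed : Int) (time_allowed : Int), Dom_car_inflows num_cars car_flow max_car_allowed time_allowed → Spec_car_inflows num_cars car_flow max_car_allowed time_allowed (car_inflows num_cars car_flow max_car_allowed time_allowed)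

-- ===== LEMMAS AND PROOFS =====

-- number of iterations the loop still performs from state (num_cars, time)
def pvSteps (car_flow : Int) (max_car_allowed : Int) (time_allowed : Int)
    (num_cars : Int) (time : Int) : Int :=
  if num_cars ≤ max_car_allowed ∨ time_allowed + 1 - time ≤ 0 then 0
  else if car_flow ≥ 0 then time_allowed + 1 - time
  else min (-(PySem.Int.floordiv (max_car_allowed - num_cars) (-car_flow))) (time_allowed + 1 - time)

-- the ceiling-division bracket is unique
theorem pvCeilUnique {a d q1 q2 : Int} (hd : 0 < d)
    (h1 : (q1 - 1) * d < a ∧ a ≤ q1 * d) (h2 : (q2 - 1) * d < a ∧ a ≤ q2 * d) : q1 = q2 := by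
  by_contra hne
  rcases lt_or_gt_of_ne hne with h | h
  · have : q1 * d ≤ (q2 - 1) * d := mul_le_mul_of_nonneg_right (by omega) (by omega)
    linarith [h1.2, h2.1]
  · have : q2 * d ≤ (q1 - 1) * d := mul_le_mul_of_nonneg_right (by omega) (by omega)
    linarith [h2.2, h1.1]

theorem pvLoopA_eq (car_flow max_car_allowed time_allowed num_cars time cars_added : Int) :
    pvLoopA car_flow max_car_allowed time_allowed num_cars time cars_added
      = cars_added + car_flow * pvSteps car_flow max_car_allowed time_allowed num_cars time := by
  induction num_cars, time, cars_added using pvLoopA.induct car_flow max_car_allowed time_allowed with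
  | case2 n t acc hgt hta ih =>
    rw [pvLoopA]
    simp only [hgt, if_pos, if_neg (by omega : ¬ t > time_allowed)]
    rw [ih]
    by_cases hcf : car_flow ≥ 0
    · -- nonnegative flow: num_cars never drops below the threshold
      have hgt' : ¬ (n + car_flow ≤ max_car_allowed) := by omega
      unfold pvSteps
      simp only [if_neg (by omega : ¬ (n ≤ max_car_allowed ∨ time_allowed + 1 - t ≤ 0)), if_pos hcf]
      by_cases ht' : time_allowed + 1 - (t + 1) ≤ 0
      · simp only [if_pos (Or.inr ht')]
        have : time_allowed + 1 - t = 1 := by omega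
        rw [this]; ring
      · simp only [if_neg (by omega : ¬ ((n + car_flow) ≤ max_car_allowed ∨ time_allowed + 1 - (t + 1) ≤ 0)), if_pos hcf]
        have : time_allowed + 1 - t = 1 + (time_allowed + 1 - (t + 1)) := by omega
        rw [this]; ring
    · -- negative flow: ceiling-division count drops by exactly one each iteration
      unfold pvSteps
      simp only [if_neg (by omega : ¬ (n ≤ max_car_allowed ∨ time_allowed + 1 - t ≤ 0)), if_neg hcf]
      set d := -car_flow with hd
      have hdpos : 0 < d := by omega
      set C := -(PySem.Int.floordiv (max_car_allowed - n) d) with hC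
      have hCb : (C - 1) * d < n - max_car_allowed ∧ n - max_car_allowed ≤ C * d := by
        have := (PySem.Int.neg_floordiv_neg_eq_iff_of_pos (a := n - max_car_allowed) (b := d) (q := C) hdpos)
        apply this.mp
        rw [hC]
        norm_num
      have hC1 : 1 ≤ C := by
        by_contra hc
        have : C * d ≤ 0 * d := mul_le_mul_of_nonneg_right (by omega) (by omega)
        have := hCb.2; nlinarith
      by_cases hdrop : n + car_flow ≤ max_car_allowed
      · -- loop exits after this iteration: exactly one step was needed
        have hC1' : C = 1 := by
          apply pvCeilUnique hdpos hCb
          constructor <;> [simp; skip] <;> omega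
        simp only [if_pos (Or.inl hdrop)]
        rw [hC1']
        have : min 1 (time_allowed + 1 - t) = 1 := by omega
        rw [this]; ring
      · -- loop continues: the new ceiling count is C - 1
        set C' := -(PySem.Int.floordiv (max_car_allowed - (n + car_flow)) d) with hC'
        have hCb' : (C' - 1) * d < n + car_flow - max_car_allowed ∧ n + car_flow - max_car_allowed ≤ C' * d := by
          have := (PySem.Int.neg_floordiv_neg_eq_iff_of_pos (a := n + car_flow - max_car_allowed) (b := d) (q := C') hdpos)
          apply this.mp
          rw [hC']
          norm_num
        have hCC' : C = C' + 1 := by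
          apply pvCeilUnique hdpos hCb
          constructor
          · have h1 := hCb'.1
            nlinarith
          · have h2 := hCb'.2
            nlinarith
        have hC'1 : 1 ≤ C' := by
          by_contra hc
          have : C' * d ≤ 0 * d := mul_le_mul_of_nonneg_right (by omega) (by omega)
          have := hCb'.2; nlinarith
        by_cases ht' : time_allowed + 1 - (t + 1) ≤ 0
        · simp only [if_pos (Or.inr ht')]
          have : min C (time_allowed + 1 - t) = 1 := by omega
          rw [this]; ring
        · simp only [if_neg (by omega : ¬ ((n + car_flow) ≤ max_car_allowed ∨ time_allowed + 1 - (t + 1) ≤ 0))]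
          have : min C (time_allowed + 1 - t) = 1 + min C' (time_allowed + 1 - (t + 1)) := by omega
          rw [this]; ring
  | case1 n t acc hgt hta =>
    rw [pvLoopA]
    simp only [hgt, if_pos, if_pos hta]
    unfold pvSteps
    simp only [if_pos (Or.inr (by omega : time_allowed + 1 - t ≤ 0))]
    ring
  | case3 n t acc hle =>
    rw [pvLoopA]
    simp only [if_neg hle]
    unfold pvSteps
    simp only [if_pos (Or.inl (by omega : n ≤ max_car_allowed))]
    ring

-- ===== VERDICT (by name: the statement is the Claim_ definition above) =====
theorem car_inflows_spec : Claim_equal_car_inflows := by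
  intro n cf m ta _
  unfold Spec_car_inflows car_inflows
  rw [pvLoopA_eq]
  unfold pvSteps car_inflows_alt
  by_cases h0 : n ≤ m ∨ ta < 0
  · simp only [if_pos h0, if_pos (show n ≤ m ∨ ta + 1 - 0 ≤ 0 by omega)]
    ring
  · simp only [if_neg h0, if_neg (show ¬ (n ≤ m ∨ ta + 1 - 0 ≤ 0) by omega)]
    by_cases hcf : cf ≥ 0
    · simp only [if_pos hcf]
      ring_nf
    · simp only [if_neg hcf]
      ring_nf
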